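-- pv_equiv track=rewrite | github.com/dikaapranata/Praktikum-ASA | praktikum 2/dazai.py | dz_hrf
-- ===== SOURCE A (Python) =====
-- def dz_hrf(s, prefix=""):
--     count = 0
--     if len(s) == 0:
--         if prefix:
--             count += 1
--         return count
--
--     if s[0] not in "aeiou":
--         count += dz_hrf(s[1:], prefix + s[0])
--
--
--     count += dz_hrf(s[1:], prefix)
--
--     return count
-- ===== SOURCE B (Python) =====
-- def dz_hrf(s, prefix=""):
--     c = sum(1 for ch in s if ch not in "aeiou")
--     return 2**c - (0 if prefix else 1)
-- ===== Notes on version B (the rewrite author's own statement) =====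
-- stated objective: faster
-- what changed: Replaced the exponential include/exclude recursion over characters by counting the non-vowel characters once and using the closed form 2^c - (0 if prefix else 1); intended as asymptotically faster (measured 8.58x at n=16; A timed out at n=64 where B returned).
import Mathlib
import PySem

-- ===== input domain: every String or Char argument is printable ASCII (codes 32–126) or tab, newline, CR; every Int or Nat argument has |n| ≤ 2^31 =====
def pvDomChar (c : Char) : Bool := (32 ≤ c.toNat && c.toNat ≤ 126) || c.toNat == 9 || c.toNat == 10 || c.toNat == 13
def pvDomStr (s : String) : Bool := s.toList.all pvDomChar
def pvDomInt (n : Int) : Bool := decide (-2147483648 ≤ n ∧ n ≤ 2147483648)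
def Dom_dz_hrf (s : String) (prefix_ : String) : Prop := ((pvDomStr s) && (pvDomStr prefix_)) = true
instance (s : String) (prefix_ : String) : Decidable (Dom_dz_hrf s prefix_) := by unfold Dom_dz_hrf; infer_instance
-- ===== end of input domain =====

-- B replaces A's exponential include/exclude recursion by the closed form 2^c - (0 or 1), c = number of
-- non-vowel characters; intended as faster (measured 8.58x at n=16; A timed out at n=64 where B returned).


-- ===== PORT A =====
-- literal transliteration of A's recursion, over the character lists of s and prefix
def dzA : List Char → List Char → Int
  | [], p => if p ≠ [] then 1 else 0
  | c :: t, p => (if c ∉ ['a','e','i','o','u'] then dzA t (p ++ [c]) else 0) + dzA t p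

def dz_hrf (s : String) (prefix_ : String) : Int := dzA s.toList prefix_.toList

-- ===== PORT B =====
def dz_hrf_alt (s : String) (prefix_ : String) : Int :=
  let c := (s.toList.filter (fun ch => ch ∉ ['a','e','i','o','u'])).length
  (2 : Int) ^ c - (if prefix_ ≠ "" then 0 else 1)

-- ===== PRECONDITION & SPEC =====
def Spec_dz_hrf (s : String) (prefix_ : String) (out : Int) : Prop := out = dz_hrf_alt s prefix_
instance (s : String) (prefix_ : String) (out : Int) : Decidable (Spec_dz_hrf s prefix_ out) := by unfold Spec_dz_hrf; infer_instance

-- ===== CLAIM (what is proved, stated in full; the proofs are below) =====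
def Claim_equal_dz_hrf : Prop := ∀ (s : String) (prefix_ : String), Dom_dz_hrf s prefix_ → Spec_dz_hrf s prefix_ (dz_hrf s prefix_)

-- ===== LEMMAS AND PROOFS =====

theorem dzA_closed (t p : List Char) :
    dzA t p = (2 : Int) ^ (t.filter (fun ch => ch ∉ ['a','e','i','o','u'])).length
              - (if p = [] then 1 else 0) := by
  induction t generalizing p with
  | nil => by_cases hp : p = [] <;> simp [dzA, hp]
  | cons c t ih =>
    by_cases hc : c ∈ ['a','e','i','o','u']
    · rw [show dzA (c :: t) p = dzA t p from by simp [dzA, hc]]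
      rw [ih]
      congr 2
      rw [List.filter_cons, if_neg (fun h => absurd hc (by simpa using h))]
    · rw [show dzA (c :: t) p = dzA t (p ++ [c]) + dzA t p from by simp [dzA, hc]]
      rw [ih, ih]
      have hne : p ++ [c] ≠ [] := by simp
      rw [if_neg hne]
      have hlen : ((c :: t).filter (fun ch => ch ∉ ['a','e','i','o','u'])).length
          = (t.filter (fun ch => ch ∉ ['a','e','i','o','u'])).length + 1 := by
        rw [List.filter_cons, if_pos (by simpa using hc)]
        simp
      rw [hlen, pow_succ]
      by_cases hp : p = [] <;> simp [hp] <;> ring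

-- ===== VERDICT (by name: the statement is the Claim_ definition above) =====
theorem dz_hrf_spec : Claim_equal_dz_hrf := by
  intro s prefix_ _
  unfold Spec_dz_hrf dz_hrf dz_hrf_alt
  rw [dzA_closed]
  have : prefix_.toList = [] ↔ prefix_ = "" := by
    constructor
    · intro h; exact String.toList_inj.mp (by simpa using h)
    · intro h; simp [h]
  split_ifs with h1 h2 <;> simp_all
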